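-- pv_equiv track=rewrite | github.com/CarlosVP120/eqidis-scripts | PolizasOdooToContpaqi/xml_to_contpaqi_xls.py | determine_tipopol
-- ===== SOURCE A (Python) =====
-- def text_lower(x):
--     return (x or "").lower()
--
-- def determine_tipopol(num_un_iden: str, concepto_pol: str, transacciones: list):
--     # transacciones: list of dicts with keys concept, descta, numcta, haber, debe
--     n = (num_un_iden or "").upper()
--     cpol = text_lower(concepto_pol)
--     ttexts = [text_lower(t["Concepto"]) + " " + text_lower(t.get("DesCta","")) for t in transacciones]
--
--     # si alguna transacción incluye "Cuenta transitoria" -> señal de que NO subir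
--     if any("cuenta transitoria" in t for t in ttexts):
--         return None  # indica salto
--
--     # reglas (ordenadas según tu lista, con pequeñas heurísticas)
--     #  - NumUnIdenPol contiene "INV/" y "FACTU/" -> Tipo 3 (diario)
--     if ("INV/" in n) or ("FACTU/" in n):
--         return 3
--
--     if "operaciones varias" in cpol:
--         return 3
--
--     # Effectively Paid rules
--     if "effectively paid" in text_lower(concepto_pol):
--         # check if any transaccion has IVA trasladado -> ingreso (1)
--         if any("iva traslad" in t for t in ttexts):
--             return 1
--         if any("iva acredit" in t for t in ttexts):
--             return 2
--
--     # BNK logic and banco logic: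
--     if "BNK" in n or n.startswith("BNK"):
--         # if any transaccion contains "clientes" -> ingreso
--         if any("clientes" in t for t in ttexts):
--             return 1
--         # if any transaccion contains "proveedores" or "gastos" or "comisiones" -> egreso
--         if any(("proveedores" in t or "gastos" in t or "comisiones" in t) for t in ttexts):
--             return 2
--         # banco + FACTU -> Egreso (2)
--         if any(("banco" in t and "factu" in t) for t in ttexts):
--             return 2
--         # banco + INV -> Ingreso (1)
--         if any(("banco" in t and "inv" in t) for t in ttexts):
--             return 1
--         # banco + SAT Impuestos -> Egreso (2)
--         if any(("banco" in t and "sat impuestos" in t) for t in ttexts):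
--             return 2
--
--     # If has "Banco" and "IVA acreditable" -> Egreso (2)
--     if any(("banco" in t and "iva acredit" in t) for t in ttexts):
--         return 2
--
--     # fallback: diario
--     return 3
-- ===== SOURCE B (Python) =====
-- def determine_tipopol(num_un_iden: str, concepto_pol: str, transacciones: list):
--     n = (num_un_iden or "").upper()
--     cpol = (concepto_pol or "").lower()
--     # one pass over the transactions: build each lowered text once, keep boolean flags
--     transitoria = traslad = acredit = clientes = prov = factu_b = inv_b = sat_b = iva_acr_b = False
--     for t in transacciones:
--         txt = (t["Concepto"] or "").lower() + " " + (t.get("DesCta", "") or "").lower()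
--         banco = "banco" in txt
--         transitoria = transitoria or "cuenta transitoria" in txt
--         traslad = traslad or "iva traslad" in txt
--         acredit = acredit or "iva acredit" in txt
--         clientes = clientes or "clientes" in txt
--         prov = prov or "proveedores" in txt or "gastos" in txt or "comisiones" in txt
--         factu_b = factu_b or (banco and "factu" in txt)
--         inv_b = inv_b or (banco and "inv" in txt)
--         sat_b = sat_b or (banco and "sat impuestos" in txt)
--         iva_acr_b = iva_acr_b or (banco and "iva acredit" in txt)
--     if transitoria:
--         return None
--     if "INV/" in n or "FACTU/" in n or "operaciones varias" in cpol:
--         return 3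
--     if "effectively paid" in cpol:
--         if traslad:
--             return 1
--         if acredit:
--             return 2
--     if "BNK" in n:
--         if clientes:
--             return 1
--         if prov or factu_b:
--             return 2
--         if inv_b:
--             return 1
--         if sat_b:
--             return 2
--     if iva_acr_b:
--         return 2
--     return 3
-- ===== Notes on version B (the rewrite author's own statement) =====
-- stated objective: alternative
-- what changed: B replaces A's list of texts plus nine separate any()-scans with a single pass over the transactions that sets boolean flags, and a decision cascade over those flags with adjacent equal-result rules merged.
import Mathlib
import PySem

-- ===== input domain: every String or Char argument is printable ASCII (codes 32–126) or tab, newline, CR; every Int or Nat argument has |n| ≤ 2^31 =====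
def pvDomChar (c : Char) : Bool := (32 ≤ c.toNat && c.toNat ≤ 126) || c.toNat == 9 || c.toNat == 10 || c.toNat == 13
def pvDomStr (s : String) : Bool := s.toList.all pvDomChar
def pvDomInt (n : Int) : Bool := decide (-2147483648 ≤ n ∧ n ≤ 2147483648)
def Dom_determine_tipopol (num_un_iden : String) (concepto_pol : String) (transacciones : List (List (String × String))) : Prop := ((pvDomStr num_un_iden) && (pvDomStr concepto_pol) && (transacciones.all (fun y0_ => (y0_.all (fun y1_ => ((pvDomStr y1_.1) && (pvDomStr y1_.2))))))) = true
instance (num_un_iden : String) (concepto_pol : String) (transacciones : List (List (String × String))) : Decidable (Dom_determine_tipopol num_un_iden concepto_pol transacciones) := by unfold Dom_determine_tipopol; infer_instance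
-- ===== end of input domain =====

-- B replaces A's list of texts plus nine separate any()-scans with a single flag-building
-- pass over the transactions and a decision cascade on the flags (adjacent equal-result
-- rules merged); objective: alternative decomposition, not claimed faster.

-- ===== PORT A =====
-- A's ttexts entry: text_lower(t["Concepto"]) + " " + text_lower(t.get("DesCta","")).
-- Python raises KeyError when "Concepto" is missing; Pre_ excludes that, so getD with
-- default "" is exact on Pre_.
def pvTTextA (t : List (String × String)) : List Char :=
  PySem.Chars.lower (PySem.Dict.getD (PySem.Dict.mk t) "Concepto" "").toList
    ++ (' ' :: PySem.Chars.lower (PySem.Dict.getD (PySem.Dict.mk t) "DesCta" "").toList)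

def determine_tipopol (num_un_iden : String) (concepto_pol : String) (transacciones : List (List (String × String))) : Option Int :=
  let n := PySem.Chars.upper num_un_iden.toList
  let cpol := PySem.Chars.lower concepto_pol.toList
  let ttexts := transacciones.map pvTTextA
  if ttexts.any (fun t => PySem.Chars.isIn "cuenta transitoria".toList t) then none
  else if PySem.Chars.isIn "INV/".toList n || PySem.Chars.isIn "FACTU/".toList n then some 3
  else if PySem.Chars.isIn "operaciones varias".toList cpol then some 3
  -- Python's nested "effectively paid" block, flattened with fall-through made explicit
  else if PySem.Chars.isIn "effectively paid".toList (PySem.Chars.lower concepto_pol.toList)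
          && ttexts.any (fun t => PySem.Chars.isIn "iva traslad".toList t) then some 1
  else if PySem.Chars.isIn "effectively paid".toList (PySem.Chars.lower concepto_pol.toList)
          && ttexts.any (fun t => PySem.Chars.isIn "iva acredit".toList t) then some 2
  else if (PySem.Chars.isIn "BNK".toList n || PySem.Chars.startswith n "BNK".toList)
          && ttexts.any (fun t => PySem.Chars.isIn "clientes".toList t) then some 1
  else if (PySem.Chars.isIn "BNK".toList n || PySem.Chars.startswith n "BNK".toList)
          && ttexts.any (fun t => PySem.Chars.isIn "proveedores".toList t || PySem.Chars.isIn "gastos".toList t || PySem.Chars.isIn "comisiones".toList t) then some 2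
  else if (PySem.Chars.isIn "BNK".toList n || PySem.Chars.startswith n "BNK".toList)
          && ttexts.any (fun t => PySem.Chars.isIn "banco".toList t && PySem.Chars.isIn "factu".toList t) then some 2
  else if (PySem.Chars.isIn "BNK".toList n || PySem.Chars.startswith n "BNK".toList)
          && ttexts.any (fun t => PySem.Chars.isIn "banco".toList t && PySem.Chars.isIn "inv".toList t) then some 1
  else if (PySem.Chars.isIn "BNK".toList n || PySem.Chars.startswith n "BNK".toList)
          && ttexts.any (fun t => PySem.Chars.isIn "banco".toList t && PySem.Chars.isIn "sat impuestos".toList t) then some 2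
  else if ttexts.any (fun t => PySem.Chars.isIn "banco".toList t && PySem.Chars.isIn "iva acredit".toList t) then some 2
  else some 3

-- ===== PORT B =====
-- nine flags: (transitoria, traslad, acredit, clientes, prov, factu_b, inv_b, sat_b, iva_acr_b)
def pvFlags (transacciones : List (List (String × String))) :
    Bool × Bool × Bool × Bool × Bool × Bool × Bool × Bool × Bool :=
  transacciones.foldl (fun f t =>
    let txt := PySem.Chars.lower (PySem.Dict.getD (PySem.Dict.mk t) "Concepto" "").toList
      ++ (' ' :: PySem.Chars.lower (PySem.Dict.getD (PySem.Dict.mk t) "DesCta" "").toList)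
    let banco := PySem.Chars.isIn "banco".toList txt
    (f.1 || PySem.Chars.isIn "cuenta transitoria".toList txt,
     f.2.1 || PySem.Chars.isIn "iva traslad".toList txt,
     f.2.2.1 || PySem.Chars.isIn "iva acredit".toList txt,
     f.2.2.2.1 || PySem.Chars.isIn "clientes".toList txt,
     f.2.2.2.2.1 || PySem.Chars.isIn "proveedores".toList txt || PySem.Chars.isIn "gastos".toList txt || PySem.Chars.isIn "comisiones".toList txt,
     f.2.2.2.2.2.1 || (banco && PySem.Chars.isIn "factu".toList txt),
     f.2.2.2.2.2.2.1 || (banco && PySem.Chars.isIn "inv".toList txt),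
     f.2.2.2.2.2.2.2.1 || (banco && PySem.Chars.isIn "sat impuestos".toList txt),
     f.2.2.2.2.2.2.2.2 || (banco && PySem.Chars.isIn "iva acredit".toList txt)))
    (false, false, false, false, false, false, false, false, false)

def determine_tipopol_alt (num_un_iden : String) (concepto_pol : String) (transacciones : List (List (String × String))) : Option Int :=
  let n := PySem.Chars.upper num_un_iden.toList
  let cpol := PySem.Chars.lower concepto_pol.toList
  let f := pvFlags transacciones
  if f.1 then none
  else if PySem.Chars.isIn "INV/".toList n || PySem.Chars.isIn "FACTU/".toList n
          || PySem.Chars.isIn "operaciones varias".toList cpol then some 3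
  else if PySem.Chars.isIn "effectively paid".toList cpol && f.2.1 then some 1
  else if PySem.Chars.isIn "effectively paid".toList cpol && f.2.2.1 then some 2
  else if PySem.Chars.isIn "BNK".toList n && f.2.2.2.1 then some 1
  else if PySem.Chars.isIn "BNK".toList n && (f.2.2.2.2.1 || f.2.2.2.2.2.1) then some 2
  else if PySem.Chars.isIn "BNK".toList n && f.2.2.2.2.2.2.1 then some 1
  else if PySem.Chars.isIn "BNK".toList n && f.2.2.2.2.2.2.2.1 then some 2
  else if f.2.2.2.2.2.2.2.2 then some 2
  else some 3

-- ===== PRECONDITION & SPEC =====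
-- Pre_ excludes transactions without a "Concepto" key: there A raises KeyError (and B does too).
def Pre_determine_tipopol (num_un_iden : String) (concepto_pol : String) (transacciones : List (List (String × String))) : Prop :=
  ∀ t ∈ transacciones, ((PySem.Dict.mk t).get? "Concepto").isSome
instance (num_un_iden : String) (concepto_pol : String) (transacciones : List (List (String × String))) : Decidable (Pre_determine_tipopol num_un_iden concepto_pol transacciones) := by unfold Pre_determine_tipopol; infer_instance

def pvWitness_determine_tipopol : String × String × (List (List (String × String))) :=
  ("BNK1", "pago effectively paid", [[("Concepto", "Clientes varios"), ("DesCta", "Banco")]])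

def Spec_determine_tipopol (num_un_iden : String) (concepto_pol : String) (transacciones : List (List (String × String))) (out : Option Int) : Prop := out = determine_tipopol_alt num_un_iden concepto_pol transacciones
instance (num_un_iden : String) (concepto_pol : String) (transacciones : List (List (String × String))) (out : Option Int) : Decidable (Spec_determine_tipopol num_un_iden concepto_pol transacciones out) := by unfold Spec_determine_tipopol; infer_instance

-- ===== CLAIM (what is proved, stated in full; the proofs are below) =====
def Claim_equal_determine_tipopol : Prop := ∀ (num_un_iden : String) (concepto_pol : String) (transacciones : List (List (String × String))), Dom_determine_tipopol num_un_iden concepto_pol transacciones → Pre_determine_tipopol num_un_iden concepto_pol transacciones → Spec_determine_tipopol num_un_iden concepto_pol transacciones (determine_tipopol num_un_iden concepto_pol transacciones)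

-- ===== LEMMAS AND PROOFS =====

-- the one-pass fold computes exactly the nine any()-scans of A
theorem pvFlags_fold (ts : List (List (String × String)))
    (f : Bool × Bool × Bool × Bool × Bool × Bool × Bool × Bool × Bool) :
    ts.foldl (fun f t =>
      let txt := PySem.Chars.lower (PySem.Dict.getD (PySem.Dict.mk t) "Concepto" "").toList
        ++ (' ' :: PySem.Chars.lower (PySem.Dict.getD (PySem.Dict.mk t) "DesCta" "").toList)
      let banco := PySem.Chars.isIn "banco".toList txt
      (f.1 || PySem.Chars.isIn "cuenta transitoria".toList txt,
       f.2.1 || PySem.Chars.isIn "iva traslad".toList txt,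
       f.2.2.1 || PySem.Chars.isIn "iva acredit".toList txt,
       f.2.2.2.1 || PySem.Chars.isIn "clientes".toList txt,
       f.2.2.2.2.1 || PySem.Chars.isIn "proveedores".toList txt || PySem.Chars.isIn "gastos".toList txt || PySem.Chars.isIn "comisiones".toList txt,
       f.2.2.2.2.2.1 || (banco && PySem.Chars.isIn "factu".toList txt),
       f.2.2.2.2.2.2.1 || (banco && PySem.Chars.isIn "inv".toList txt),
       f.2.2.2.2.2.2.2.1 || (banco && PySem.Chars.isIn "sat impuestos".toList txt),
       f.2.2.2.2.2.2.2.2 || (banco && PySem.Chars.isIn "iva acredit".toList txt))) f =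
      (f.1 || (ts.map pvTTextA).any (fun t => PySem.Chars.isIn "cuenta transitoria".toList t),
       f.2.1 || (ts.map pvTTextA).any (fun t => PySem.Chars.isIn "iva traslad".toList t),
       f.2.2.1 || (ts.map pvTTextA).any (fun t => PySem.Chars.isIn "iva acredit".toList t),
       f.2.2.2.1 || (ts.map pvTTextA).any (fun t => PySem.Chars.isIn "clientes".toList t),
       f.2.2.2.2.1 || (ts.map pvTTextA).any (fun t => PySem.Chars.isIn "proveedores".toList t || PySem.Chars.isIn "gastos".toList t || PySem.Chars.isIn "comisiones".toList t),
       f.2.2.2.2.2.1 || (ts.map pvTTextA).any (fun t => PySem.Chars.isIn "banco".toList t && PySem.Chars.isIn "factu".toList t),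
       f.2.2.2.2.2.2.1 || (ts.map pvTTextA).any (fun t => PySem.Chars.isIn "banco".toList t && PySem.Chars.isIn "inv".toList t),
       f.2.2.2.2.2.2.2.1 || (ts.map pvTTextA).any (fun t => PySem.Chars.isIn "banco".toList t && PySem.Chars.isIn "sat impuestos".toList t),
       f.2.2.2.2.2.2.2.2 || (ts.map pvTTextA).any (fun t => PySem.Chars.isIn "banco".toList t && PySem.Chars.isIn "iva acredit".toList t)) := by
  induction ts generalizing f with
  | nil => simp
  | cons a l ih =>
    simp only [List.foldl_cons, List.map_cons, List.any_cons]
    rw [ih]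
    simp [pvTTextA, Bool.or_assoc]

theorem pvFlags_eq (ts : List (List (String × String))) :
    pvFlags ts =
      ((ts.map pvTTextA).any (fun t => PySem.Chars.isIn "cuenta transitoria".toList t),
       (ts.map pvTTextA).any (fun t => PySem.Chars.isIn "iva traslad".toList t),
       (ts.map pvTTextA).any (fun t => PySem.Chars.isIn "iva acredit".toList t),
       (ts.map pvTTextA).any (fun t => PySem.Chars.isIn "clientes".toList t),
       (ts.map pvTTextA).any (fun t => PySem.Chars.isIn "proveedores".toList t || PySem.Chars.isIn "gastos".toList t || PySem.Chars.isIn "comisiones".toList t),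
       (ts.map pvTTextA).any (fun t => PySem.Chars.isIn "banco".toList t && PySem.Chars.isIn "factu".toList t),
       (ts.map pvTTextA).any (fun t => PySem.Chars.isIn "banco".toList t && PySem.Chars.isIn "inv".toList t),
       (ts.map pvTTextA).any (fun t => PySem.Chars.isIn "banco".toList t && PySem.Chars.isIn "sat impuestos".toList t),
       (ts.map pvTTextA).any (fun t => PySem.Chars.isIn "banco".toList t && PySem.Chars.isIn "iva acredit".toList t)) := by
  unfold pvFlags
  rw [pvFlags_fold]
  simp

theorem pv_bnk_or (n : List Char) :
    (PySem.Chars.isIn "BNK".toList n || PySem.Chars.startswith n "BNK".toList)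
      = PySem.Chars.isIn "BNK".toList n := by
  cases h : PySem.Chars.startswith n "BNK".toList with
  | false => simp
  | true =>
    have hin : PySem.Chars.isIn "BNK".toList n = true :=
      (PySem.Chars.isIn_iff_infix _ _).mpr ((PySem.Chars.startswith_iff n _).mp h).isInfix
    simpa using hin

-- the two rule cascades agree for every valuation of the boolean atoms
theorem pvCascade (i3 fa ov e bnk a1 a2 a3 a4 a5 a6 a7 a8 a9 : Bool) :
    (if a1 then (none : Option Int)
     else if i3 || fa then some 3
     else if ov then some 3
     else if e && a2 then some 1
     else if e && a3 then some 2
     else if bnk && a4 then some 1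
     else if bnk && a5 then some 2
     else if bnk && a6 then some 2
     else if bnk && a7 then some 1
     else if bnk && a8 then some 2
     else if a9 then some 2
     else some 3) =
    (if a1 then none
     else if i3 || fa || ov then some 3
     else if e && a2 then some 1
     else if e && a3 then some 2
     else if bnk && a4 then some 1
     else if bnk && (a5 || a6) then some 2
     else if bnk && a7 then some 1
     else if bnk && a8 then some 2
     else if a9 then some 2
     else some 3) := by
  revert i3 fa ov e bnk a1 a2 a3 a4 a5 a6 a7 a8 a9
  decide

-- ===== VERDICT (by name: the statement is the Claim_ definition above) =====
theorem determine_tipopol_spec : Claim_equal_determine_tipopol := by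
  intro num_un_iden concepto_pol transacciones _hdom _hpre
  unfold Spec_determine_tipopol determine_tipopol determine_tipopol_alt
  simp only [pvFlags_eq, pv_bnk_or]
  exact pvCascade _ _ _ _ _ _ _ _ _ _ _ _ _ _
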